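-- pv_equiv track=rewrite | github.com/ugurerol/Oracle_RPD_XML | main.py | join_lt_unique_prs_lists
-- ===== SOURCE A (Python) =====
-- from collections import defaultdict
--
-- def join_lt_unique_prs_lists(prs_lt_join_list, prs_list):
--     """
--     prs_lt_join_list ile prs_list'i prs_mdsid üzerinden joinler.
--     Her eşleşme için tüm kolonlar eklenir.
--     """
--     # prs_list'i prs_mdsid bazinda grupla
--     prs_dict = defaultdict(list)
--     for item in prs_list:
--         mdsid = item.get("prs_mdsid")
--         if mdsid:
--             prs_dict[mdsid].append(item)
--
--     # join islemi
--     joined_list = []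
--
--     for lt_item in prs_lt_join_list:
--         mdsid = lt_item.get("prs_mdsid")
--         if mdsid in prs_dict:
--             for prs_item in prs_dict[mdsid]:
--                 # lt_item ve prs_item'i birlestir
--                 new_item = {**lt_item}  # shallow copy
--                 for k, v in prs_item.items():
--                     if k in new_item:
--                         new_item[f"{k}_prs"] = v  # cakisirsa _prs ekle
--                     else:
--                         new_item[k] = v
--                 joined_list.append(new_item)
--         else:
--             # eslesme yoksa sadece lt_item ekle
--             joined_list.append({**lt_item})
--
--     return joined_list
-- ===== SOURCE B (Python) =====
-- def join_lt_unique_prs_lists(prs_lt_join_list, prs_list):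
--     """Nested-loop join on prs_mdsid: no pre-built index; scan prs_list per lt_item."""
--     joined = []
--     for lt_item in prs_lt_join_list:
--         lt_id = lt_item.get("prs_mdsid")
--         found = False
--         for prs_item in prs_list:
--             pid = prs_item.get("prs_mdsid")
--             if pid and pid == lt_id:
--                 merged = dict(lt_item)
--                 for k, v in prs_item.items():
--                     if k in merged:
--                         merged[k + "_prs"] = v
--                     else:
--                         merged[k] = v
--                 joined.append(merged)
--                 found = True
--         if not found:
--             joined.append(dict(lt_item))
--     return joined
-- ===== Notes on version B (the rewrite author's own statement) =====
-- stated objective: alternative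
-- what changed: Replaces the defaultdict hash-index build + lookup with a direct nested-loop join: each lt_item scans prs_list for truthy matching prs_mdsid, merging in place and using a found-flag for the lone-copy case.
import Mathlib
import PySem

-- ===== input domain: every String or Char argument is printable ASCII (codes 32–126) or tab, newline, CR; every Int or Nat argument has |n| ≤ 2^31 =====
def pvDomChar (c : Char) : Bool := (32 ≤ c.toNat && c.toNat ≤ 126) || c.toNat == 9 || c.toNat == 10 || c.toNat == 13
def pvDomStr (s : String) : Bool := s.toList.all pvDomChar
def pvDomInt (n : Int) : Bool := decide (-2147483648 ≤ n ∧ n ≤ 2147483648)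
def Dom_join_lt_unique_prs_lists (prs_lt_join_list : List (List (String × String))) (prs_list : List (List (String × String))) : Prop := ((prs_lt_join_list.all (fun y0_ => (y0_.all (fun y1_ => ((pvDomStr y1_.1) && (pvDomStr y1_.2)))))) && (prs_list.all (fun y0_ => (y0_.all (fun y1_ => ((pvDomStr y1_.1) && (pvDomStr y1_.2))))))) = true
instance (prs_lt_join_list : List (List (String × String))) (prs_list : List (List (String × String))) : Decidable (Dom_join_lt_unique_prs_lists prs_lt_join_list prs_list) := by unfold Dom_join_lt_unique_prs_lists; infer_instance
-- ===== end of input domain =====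

-- B replaces A's defaultdict hash-index join with a direct nested-loop join (same output, no index build); equivalence of RETURN values is proved.
-- Dicts are association lists (insertion order, unique keys as produced from Python dicts).

-- ===== PORT A =====
-- item.get("prs_mdsid")
def pvKeyOf (it : List (String × String)) : Option String :=
  (PySem.Dict.mk it).get? "prs_mdsid"

-- the merge loop both Pythons share verbatim: new_item = {**lt_item}; for k, v in prs_item.items(): suffix "_prs" on collision
def pvMergeItem (lt_item prs_item : List (String × String)) : List (String × String) :=
  (prs_item.foldl
    (fun (new_item : PySem.Dict String String) kv =>
      if new_item.contains kv.1 then new_item.insert (kv.1 ++ "_prs") kv.2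
      else new_item.insert kv.1 kv.2)
    (PySem.Dict.mk lt_item)).items

-- one step of A's grouping loop: mdsid = item.get("prs_mdsid"); if mdsid: prs_dict[mdsid].append(item)
def pvGroupStep (d : PySem.Dict String (List (List (String × String)))) (item : List (String × String)) : PySem.Dict String (List (List (String × String))) :=
  match pvKeyOf item with
  | some mdsid => if mdsid ≠ "" then d.modify mdsid [] (· ++ [item]) else d
  | none => d

def join_lt_unique_prs_lists (prs_lt_join_list : List (List (String × String))) (prs_list : List (List (String × String))) : List (List (String × String)) :=
  let prs_dict := prs_list.foldl pvGroupStep PySem.Dict.empty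
  prs_lt_join_list.foldl
    (fun joined_list lt_item =>
      match pvKeyOf lt_item with
      | some mdsid =>
          if prs_dict.contains mdsid then
            (prs_dict.getD mdsid []).foldl
              (fun j prs_item => j ++ [pvMergeItem lt_item prs_item]) joined_list
          else joined_list ++ [lt_item]   -- {**lt_item} is lt_item as an association list
      | none => joined_list ++ [lt_item]) []

-- ===== PORT B =====
def join_lt_unique_prs_lists_alt (prs_lt_join_list : List (List (String × String))) (prs_list : List (List (String × String))) : List (List (String × String)) :=
  prs_lt_join_list.foldl
    (fun joined lt_item =>
      let lt_id := pvKeyOf lt_item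
      -- inner scan over prs_list with a found-flag
      let st := prs_list.foldl
        (fun (st : List (List (String × String)) × Bool) prs_item =>
          match pvKeyOf prs_item with
          | some pid =>
              if pid ≠ "" ∧ some pid = lt_id then (st.1 ++ [pvMergeItem lt_item prs_item], true)
              else st
          | none => st)
        (joined, false)
      if st.2 then st.1 else st.1 ++ [lt_item]) []

-- ===== PRECONDITION & SPEC =====
def Spec_join_lt_unique_prs_lists (prs_lt_join_list : List (List (String × String))) (prs_list : List (List (String × String))) (out : List (List (String × String))) : Prop := out = join_lt_unique_prs_lists_alt prs_lt_join_list prs_list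
instance (prs_lt_join_list : List (List (String × String))) (prs_list : List (List (String × String))) (out : List (List (String × String))) : Decidable (Spec_join_lt_unique_prs_lists prs_lt_join_list prs_list out) := by unfold Spec_join_lt_unique_prs_lists; infer_instance

-- ===== CLAIM (what is proved, stated in full; the proofs are below) =====
def Claim_equal_join_lt_unique_prs_lists : Prop := ∀ (prs_lt_join_list : List (List (String × String))) (prs_list : List (List (String × String))), Dom_join_lt_unique_prs_lists prs_lt_join_list prs_list → Spec_join_lt_unique_prs_lists prs_lt_join_list prs_list (join_lt_unique_prs_lists prs_lt_join_list prs_list)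

-- ===== LEMMAS AND PROOFS =====

-- the items of prs_list that A groups under key s / that B joins with an lt_item whose id is s
def pvMatches (s : String) (it : List (String × String)) : Bool := pvKeyOf it == some s

-- A's grouping loop: each bucket s ≠ "" collects exactly the matching items, in prs_list order
theorem pvGroup_getD (prs : List (List (String × String)))
    (d : PySem.Dict String (List (List (String × String)))) (s : String) (hs : s ≠ "") :
    (prs.foldl pvGroupStep d).getD s [] = d.getD s [] ++ prs.filter (pvMatches s) := by
  induction prs generalizing d with
  | nil => simp
  | cons h t ih =>
    simp only [List.foldl_cons, List.filter_cons]
    rw [ih]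
    unfold pvGroupStep pvMatches
    cases hk : pvKeyOf h with
    | none => simp
    | some m =>
      by_cases hm : m = ""
      · subst hm
        simp [Ne.symm hs]
      · have hd := PySem.Dict.getD_modify d m s ([] : List (List (String × String))) (· ++ [h])
        by_cases hms : s = m
        · subst hms
          dsimp only
          rw [if_pos hm, hd, if_pos rfl]
          simp
        · have hsm : ¬ m = s := fun hh => hms hh.symm
          simp [hm, hd, beq_iff_eq, hms, hsm]

-- A's grouping loop never creates a bucket for the falsy key ""
theorem pvGroup_contains_empty_key (prs : List (List (String × String)))
    (d : PySem.Dict String (List (List (String × String)))) :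
    (prs.foldl pvGroupStep d).contains "" = d.contains "" := by
  induction prs generalizing d with
  | nil => rfl
  | cons h t ih =>
    simp only [List.foldl_cons]
    rw [ih]
    unfold pvGroupStep
    cases hk : pvKeyOf h with
    | none => rfl
    | some m =>
      by_cases hm : m = ""
      · simp [hm]
      · simp [hm, PySem.Dict.contains_modify, Ne.symm hm]

-- a key s ≠ "" is in A's index exactly when some item matches it
theorem pvGroup_contains (prs : List (List (String × String)))
    (d : PySem.Dict String (List (List (String × String)))) (s : String) (hs : s ≠ "") :
    (prs.foldl pvGroupStep d).contains s = (d.contains s || !(prs.filter (pvMatches s)).isEmpty) := by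
  induction prs generalizing d with
  | nil => simp
  | cons h t ih =>
    simp only [List.foldl_cons, List.filter_cons]
    rw [ih]
    unfold pvGroupStep pvMatches
    cases hk : pvKeyOf h with
    | none => simp
    | some m =>
      by_cases hm : m = ""
      · subst hm
        simp [Ne.symm hs]
      · have hc := PySem.Dict.contains_modify d m s ([] : List (List (String × String))) (· ++ [h])
        by_cases hms : s = m
        · subst hms; simp [hm, hc]
        · have hsm : ¬ m = s := fun hh => hms hh.symm
          have hb : (s == m) = false := beq_eq_false_iff_ne.mpr hms
          simp [hm, hc, hb, hsm]

-- B's inner scan appends exactly the merged matching items and reports whether any matched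
theorem pvScan_eq (prs : List (List (String × String))) (lt_item : List (String × String))
    (lt_id : Option String) (joined : List (List (String × String))) (b : Bool) :
    prs.foldl
      (fun (st : List (List (String × String)) × Bool) prs_item =>
        match pvKeyOf prs_item with
        | some pid =>
            if pid ≠ "" ∧ some pid = lt_id then (st.1 ++ [pvMergeItem lt_item prs_item], true)
            else st
        | none => st)
      (joined, b)
    = (joined ++ ((prs.filter (fun it => match pvKeyOf it with
          | some pid => decide (pid ≠ "" ∧ some pid = lt_id)
          | none => false)).map (pvMergeItem lt_item)),
       b || !(prs.filter (fun it => match pvKeyOf it with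
          | some pid => decide (pid ≠ "" ∧ some pid = lt_id)
          | none => false)).isEmpty) := by
  induction prs generalizing joined b with
  | nil => simp
  | cons h t ih =>
    simp only [List.foldl_cons, List.filter_cons]
    cases hk : pvKeyOf h with
    | none => simpa using ih joined b
    | some pid =>
      by_cases hc : pid ≠ "" ∧ some pid = lt_id
      · dsimp only
        rw [if_pos hc, ih]
        simp [hc]
      · dsimp only
        rw [if_neg hc, ih]
        simp [hc]

-- B's match predicate coincides with A's bucket predicate for a truthy id
theorem pvPred_eq_matches (m : String) (hm : m ≠ "") (it : List (String × String)) :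
    (match pvKeyOf it with
      | some pid => decide (pid ≠ "" ∧ some pid = some m)
      | none => false) = pvMatches m it := by
  unfold pvMatches
  cases hk : pvKeyOf it with
  | none => simp
  | some pid =>
    by_cases hp : pid = m
    · subst hp; simp [hm]
    · simp [hp]

-- A's per-lt_item contribution equals B's per-lt_item contribution
theorem pvElem_eq (prs_list : List (List (String × String))) (lt_item : List (String × String))
    (joined : List (List (String × String))) :
    (match pvKeyOf lt_item with
      | some mdsid =>
          if (prs_list.foldl pvGroupStep PySem.Dict.empty).contains mdsid then
            ((prs_list.foldl pvGroupStep PySem.Dict.empty).getD mdsid []).foldl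
              (fun j prs_item => j ++ [pvMergeItem lt_item prs_item]) joined
          else joined ++ [lt_item]
      | none => joined ++ [lt_item])
    = (if (prs_list.foldl
            (fun (st : List (List (String × String)) × Bool) prs_item =>
              match pvKeyOf prs_item with
              | some pid =>
                  if pid ≠ "" ∧ some pid = pvKeyOf lt_item then
                    (st.1 ++ [pvMergeItem lt_item prs_item], true)
                  else st
              | none => st)
            (joined, false)).2 then
        (prs_list.foldl
            (fun (st : List (List (String × String)) × Bool) prs_item =>
              match pvKeyOf prs_item with
              | some pid =>
                  if pid ≠ "" ∧ some pid = pvKeyOf lt_item then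
                    (st.1 ++ [pvMergeItem lt_item prs_item], true)
                  else st
              | none => st)
            (joined, false)).1
      else
        (prs_list.foldl
            (fun (st : List (List (String × String)) × Bool) prs_item =>
              match pvKeyOf prs_item with
              | some pid =>
                  if pid ≠ "" ∧ some pid = pvKeyOf lt_item then
                    (st.1 ++ [pvMergeItem lt_item prs_item], true)
                  else st
              | none => st)
            (joined, false)).1 ++ [lt_item]) := by
  rw [pvScan_eq prs_list lt_item (pvKeyOf lt_item) joined false]
  cases hk : pvKeyOf lt_item with
  | none =>
    have hfil : (prs_list.filter (fun it => match pvKeyOf it with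
        | some pid => decide (pid ≠ "" ∧ some pid = (none : Option String))
        | none => false)) = [] := by
      refine List.filter_eq_nil_iff.mpr (fun it _ => ?_)
      cases pvKeyOf it <;> simp
    rw [hfil]
    simp
  | some m =>
    by_cases hm : m = ""
    · subst hm
      have hcon : (prs_list.foldl pvGroupStep PySem.Dict.empty).contains "" = false := by
        rw [pvGroup_contains_empty_key]; exact PySem.Dict.contains_empty _
      have hfil : (prs_list.filter (fun it => match pvKeyOf it with
          | some pid => decide (pid ≠ "" ∧ some pid = some "")
          | none => false)) = [] := by
        refine List.filter_eq_nil_iff.mpr (fun it _ => ?_)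
        cases pvKeyOf it with
        | none => simp
        | some pid =>
          by_cases hp : pid = "" <;> simp [hp]
      rw [hfil]
      simp [hcon]
    · rw [List.filter_congr (fun it _ => pvPred_eq_matches m hm it)]
      dsimp only
      rw [pvGroup_contains prs_list PySem.Dict.empty m hm,
        pvGroup_getD prs_list PySem.Dict.empty m hm]
      simp only [PySem.Dict.contains_empty, PySem.Dict.getD_empty, List.nil_append,
        Bool.false_or, PySem.List.foldl_append_singleton_eq_map]
      by_cases hE : (prs_list.filter (pvMatches m)) = []
      · rw [hE]; simp
      · simp [hE]

-- ===== VERDICT (by name: the statement is the Claim_ definition above) =====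
theorem join_lt_unique_prs_lists_spec : Claim_equal_join_lt_unique_prs_lists := by
  intro lt_list prs_list _
  unfold Spec_join_lt_unique_prs_lists join_lt_unique_prs_lists join_lt_unique_prs_lists_alt
  apply PySem.List.foldl_congr_mem
  intro joined lt_item _
  dsimp only
  exact pvElem_eq prs_list lt_item joined
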